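-- pv_equiv track=rewrite | github.com/mrdrano/Multiplication-of-Polynomial-Texts | main.py | retrace_or_not
-- ===== SOURCE A (Python) =====
-- def retrace(ddos, raw):
--
--     fic = []
--     for i in range(len(raw)):
--         if ("^" in raw[i]):
--             fic.append(1)
--         else:
--             fic.append(0)
--
--     lastt = []  # fic =  [1, 1, 0, 1, 1, 0]
--
--     h = 0  # raw =  ['XX^2', '-XY^2', '+XZ', '+YX^2', '-YY^2', '+YZ']
--     for i in range(len(fic)):  # ddos = ['X^3', '-XY^2', '+YX^2', '-Y^3']  0-3
--         if (fic[i] == 1):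
--             lastt.append(ddos[h])
--             h += 1
--
--         if (fic[i] == 0):
--             lastt.append(raw[i])
--
--     return lastt
--
-- def retrace_or_not(ddos, listtt):    # to determine whether to retrace in the above def retrace_or_not
--     flag = 0                         # because some polys are just simple multiplication
--     for each in listtt:
--
--         if ("^" in each):
--             flag = 0
--         else:
--             flag = 1
--             break
--
--     if (flag == 1):
--         return retrace(ddos, listtt)
--
--     else:
--         return ddos
-- ===== SOURCE B (Python) =====
-- def retrace_or_not(ddos, listtt):
--     k = sum("^" in t for t in listtt)
--     if k == len(listtt):
--         return ddos
--     out = list(ddos[:k])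
--     for i, t in enumerate(listtt):
--         if "^" not in t:
--             out.insert(i, t)
--     return out
-- ===== Notes on version B (the rewrite author's own statement) =====
-- stated objective: alternative
-- what changed: Instead of A's 0/1 table plus a counter-driven left-to-right merge, B counts the power terms, copies that prefix of ddos, and splices each plain term of listtt into it in place with list.insert at its own index; the all-power case falls out of the count.
import Mathlib
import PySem

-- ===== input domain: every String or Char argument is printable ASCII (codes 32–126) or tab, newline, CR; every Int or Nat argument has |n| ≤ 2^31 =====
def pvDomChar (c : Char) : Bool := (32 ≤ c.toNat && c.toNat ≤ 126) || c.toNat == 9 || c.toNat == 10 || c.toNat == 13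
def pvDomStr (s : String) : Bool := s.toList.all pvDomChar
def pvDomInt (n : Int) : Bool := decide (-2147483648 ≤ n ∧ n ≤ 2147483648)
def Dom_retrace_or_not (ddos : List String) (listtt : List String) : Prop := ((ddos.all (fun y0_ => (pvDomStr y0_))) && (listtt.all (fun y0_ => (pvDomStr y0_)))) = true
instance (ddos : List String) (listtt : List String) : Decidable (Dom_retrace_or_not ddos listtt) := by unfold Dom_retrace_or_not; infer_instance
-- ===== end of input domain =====

-- B replaces A's 0/1 table and counter merge by counting the power terms, copying that
-- prefix of ddos and splicing each plain term in place with list.insert (objective: alternative).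


-- ===== PORT A =====
-- '"^" in s'
def pvCaret (s : String) : Bool := PySem.Str.isIn "^" s

-- the helper 'retrace(ddos, raw)': the fic table, then the counter loop over range(len(fic))
def pvRetrace (ddos : List String) (raw : List String) : List String :=
  let fic : List Int :=
    (PySem.List.pyRange 0 (raw.length : Int) 1).foldl
      (fun fic i => fic ++ [if pvCaret (PySem.List.pyGetD raw i "") then (1 : Int) else 0]) []
  let step : (Int × List String) → Int → (Int × List String) := fun st i =>
    let st1 := if PySem.List.pyGetD fic i 0 = 1
      then (st.1 + 1, st.2 ++ [PySem.List.pyGetD ddos st.1 ""])  -- ddos[h]: raises outside Pre_, default never read inside Pre_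
      else st
    if PySem.List.pyGetD fic i 0 = 0 then (st1.1, st1.2 ++ [PySem.List.pyGetD raw i ""]) else st1
  ((PySem.List.pyRange 0 (fic.length : Int) 1).foldl step ((0 : Int), ([] : List String))).2

-- the flag loop with its break
def pvFlagLoop (flag : Int) : List String → Int
  | [] => flag
  | t :: ts => if pvCaret t then pvFlagLoop 0 ts else 1

def retrace_or_not (ddos : List String) (listtt : List String) : List String :=
  if pvFlagLoop 0 listtt = 1 then pvRetrace ddos listtt else ddos

-- ===== PORT B =====
def retrace_or_not_alt (ddos : List String) (listtt : List String) : List String :=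
  -- k = sum("^" in t for t in listtt)
  let k : Int := listtt.foldl (fun a t => a + (if pvCaret t then 1 else 0)) 0
  if k = (listtt.length : Int) then ddos
  else
    -- out = list(ddos[:k]); then out.insert(i, t) for each plain t
    (PySem.List.enumerate listtt).foldl
      (fun out it => if ¬ pvCaret it.2 then PySem.List.insert out it.1 it.2 else out)
      (PySem.List.slice ddos none (some k))

-- ===== PRECONDITION & SPEC =====
-- Pre_ excludes exactly the inputs where A raises IndexError (more caret-terms in listtt than
-- elements of ddos, with at least one plain term); B returns a best-effort value there (see Raises_).
def Pre_retrace_or_not (ddos : List String) (listtt : List String) : Prop :=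
  listtt.all pvCaret = true ∨ listtt.countP pvCaret ≤ ddos.length
instance (ddos : List String) (listtt : List String) : Decidable (Pre_retrace_or_not ddos listtt) := by unfold Pre_retrace_or_not; infer_instance

def pvWitness_retrace_or_not : List String × List String := (["X^3"], ["XX^2", "+XZ"])

def Spec_retrace_or_not (ddos : List String) (listtt : List String) (out : List String) : Prop := out = retrace_or_not_alt ddos listtt
instance (ddos : List String) (listtt : List String) (out : List String) : Decidable (Spec_retrace_or_not ddos listtt out) := by unfold Spec_retrace_or_not; infer_instance

-- ===== CLAIM (what is proved, stated in full; the proofs are below) =====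
def Claim_equal_retrace_or_not : Prop := ∀ (ddos : List String) (listtt : List String), Dom_retrace_or_not ddos listtt → Pre_retrace_or_not ddos listtt → Spec_retrace_or_not ddos listtt (retrace_or_not ddos listtt)

-- ===== LEMMAS AND PROOFS =====

-- the merged list both programs compute (proof-only characterisation)
def pvMerge (ds : List String) : List String → List String
  | [] => []
  | t :: ts => if pvCaret t then ds.headD "" :: pvMerge ds.tail ts else t :: pvMerge ds ts

-- A's loop body, expressed on the term itself (proof helper)
def pvStepT (ddos : List String) (st : Int × List String) (t : String) : Int × List String :=
  let st1 := if pvCaret t then (st.1 + 1, st.2 ++ [PySem.List.pyGetD ddos st.1 ""]) else st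
  if pvCaret t then st1 else (st1.1, st1.2 ++ [t])

-- the fic table is a map over raw
lemma pvFic_eq (raw : List String) :
    (PySem.List.pyRange 0 (raw.length : Int) 1).foldl
      (fun fic i => fic ++ [if pvCaret (PySem.List.pyGetD raw i "") then (1 : Int) else 0]) []
    = raw.map (fun t => if pvCaret t then (1 : Int) else 0) := by
  rw [PySem.List.foldl_append_singleton_eq_map]
  rw [show (fun i => if pvCaret (PySem.List.pyGetD raw i "") then (1 : Int) else 0)
        = (fun t => if pvCaret t then (1 : Int) else 0) ∘ (fun i => PySem.List.pyGetD raw i "") from rfl]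
  rw [← List.map_map]
  rw [show ((raw.length : Int)) = PySem.List.len raw from (PySem.List.len_eq raw).symm]
  rw [PySem.List.map_pyGetD_pyRange_zero]
  simp

-- the flag loop computes 'not all have a caret'
lemma pvFlagLoop_eq (ts : List String) :
    pvFlagLoop 0 ts = if ts.all pvCaret then 0 else 1 := by
  induction ts with
  | nil => simp [pvFlagLoop]
  | cons t ts ih =>
    simp only [pvFlagLoop, List.all_cons]
    by_cases h : pvCaret t <;> simp [h, ih]

-- A's counter loop, folded over the terms themselves, is pvMerge
lemma pvLoop_eq (ddos : List String) :
    ∀ (ts : List String) (h : Nat) (acc : List String),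
    (ts.foldl (pvStepT ddos) ((h : Nat), acc)).2 = acc ++ pvMerge (ddos.drop h) ts := by
  intro ts
  induction ts with
  | nil => intro h acc; simp [pvMerge]
  | cons t ts ih =>
    intro h acc
    by_cases hc : pvCaret t
    · have hst : pvStepT ddos ((h : Nat), acc) t
          = (((h + 1 : Nat) : Int), acc ++ [PySem.List.pyGetD ddos (h : Nat) ""]) := by
        simp [pvStepT, hc]
      have h2 : PySem.List.pyGetD ddos ((h : Nat) : Int) "" = (ddos.drop h).headD "" := by
        simp [PySem.List.pyGetD_natCast, List.getD_eq_getElem?_getD,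
          List.headD_eq_head?_getD, List.head?_drop]
      rw [List.foldl_cons, hst, ih (h + 1)]
      simp [pvMerge, hc, h2, List.tail_drop]
    · have hst : pvStepT ddos ((h : Nat), acc) t = (((h : Nat) : Int), acc ++ [t]) := by
        simp [pvStepT, hc]
      rw [List.foldl_cons, hst, ih h]
      simp [pvMerge, hc]

-- the index fold in pvRetrace is the fold over the terms used in pvLoop_eq
lemma pvRetrace_eq (ddos : List String) (raw : List String) :
    pvRetrace ddos raw = pvMerge ddos raw := by
  unfold pvRetrace
  simp only [pvFic_eq, List.length_map]
  rw [show ((raw.length : Int)) = PySem.List.len raw from (PySem.List.len_eq raw).symm]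
  have hpt : ∀ (st : Int × List String) (i : Int), i ∈ PySem.List.pyRange 0 (PySem.List.len raw) 1 →
      (fun (st : Int × List String) (i : Int) =>
        if PySem.List.pyGetD (raw.map (fun t => if pvCaret t then (1 : Int) else 0)) i 0 = 0 then
          ((if PySem.List.pyGetD (raw.map (fun t => if pvCaret t then (1 : Int) else 0)) i 0 = 1 then
                (st.1 + 1, st.2 ++ [PySem.List.pyGetD ddos st.1 ""])
              else st).1,
            (if PySem.List.pyGetD (raw.map (fun t => if pvCaret t then (1 : Int) else 0)) i 0 = 1 then
                  (st.1 + 1, st.2 ++ [PySem.List.pyGetD ddos st.1 ""])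
                else st).2 ++
              [PySem.List.pyGetD raw i ""])
        else
          if PySem.List.pyGetD (raw.map (fun t => if pvCaret t then (1 : Int) else 0)) i 0 = 1 then
            (st.1 + 1, st.2 ++ [PySem.List.pyGetD ddos st.1 ""])
          else st) st i
      = pvStepT ddos st (PySem.List.pyGetD raw i "") := by
        intro st i hi
        have hi' := (PySem.List.mem_pyRange_one).1 hi
        have h0 : 0 ≤ i := hi'.1
        have hlt : i < PySem.List.len raw := hi'.2
        have e1 : PySem.List.pyGetD raw i "" = raw[i.toNat]'(by simp [PySem.List.len_eq] at hlt; omega) :=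
          PySem.List.pyGetD_eq_getElem raw "" h0 (by simpa using hlt)
        have e2 : PySem.List.pyGetD (raw.map (fun t => if pvCaret t then (1 : Int) else 0)) i 0
            = (if pvCaret (raw[i.toNat]'(by simp [PySem.List.len_eq] at hlt; omega)) then (1 : Int) else 0) := by
          rw [PySem.List.pyGetD_eq_getElem (raw.map (fun t => if pvCaret t then (1 : Int) else 0)) 0 h0 (by simpa using hlt)]
          simp
        simp only [e1, e2, pvStepT]
        by_cases hc : pvCaret (raw[i.toNat]'(by simp [PySem.List.len_eq] at hlt; omega)) <;> simp [hc]
  rw [PySem.List.foldl_congr_mem (PySem.List.pyRange 0 (PySem.List.len raw) 1) _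
      (fun (st : Int × List String) (i : Int) => pvStepT ddos st (PySem.List.pyGetD raw i ""))
      ((0 : Int), ([] : List String)) hpt]
  rw [PySem.List.foldl_pyRange_zero_pyGetD raw "" (pvStepT ddos) ((0 : Int), ([] : List String))]
  have := pvLoop_eq ddos raw 0 []
  simpa using this

-- B's running sum counts the caret terms
lemma pvSum_eq (ts : List String) :
    ts.foldl (fun a t => a + (if pvCaret t then (1 : Int) else 0)) 0
      = (ts.countP pvCaret : Int) := by
  have h : ∀ (a : Int), ts.foldl (fun a t => a + (if pvCaret t then (1 : Int) else 0)) a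
      = a + (ts.countP pvCaret : Int) := by
    induction ts with
    | nil => intro a; simp
    | cons t ts ih =>
      intro a
      by_cases hc : pvCaret t <;> simp [List.countP_cons, hc, ih] <;> push_cast <;> ring
  simpa using h 0

-- pvMerge only reads the first (countP) elements of ds
lemma pvMerge_take :
    ∀ (ts : List String) (ds : List String) (n : Nat), ts.countP pvCaret ≤ n →
      pvMerge (ds.take n) ts = pvMerge ds ts := by
  intro ts
  induction ts with
  | nil => intro ds n _; simp [pvMerge]
  | cons t ts ih =>
    intro ds n hn
    by_cases hc : pvCaret t
    · simp only [List.countP_cons, hc, if_pos] at hn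
      obtain ⟨m, rfl⟩ : ∃ m, n = m + 1 := ⟨n - 1, by omega⟩
      cases ds with
      | nil => simp [pvMerge, hc, ih [] m (by omega)]
      | cons d ds' => simp [pvMerge, hc, ih ds' m (by omega)]
    · simp only [List.countP_cons, hc] at hn
      simp [pvMerge, hc, ih ds n (by simpa using hn)]

-- B's insert fold builds pvMerge, one splice at a time
lemma pvInsertFold_eq :
    ∀ (ts : List String) (pre ds : List String), ds.length = ts.countP pvCaret →
      (PySem.List.enumerate ts (pre.length : Int)).foldl
        (fun out it => if ¬ pvCaret it.2 then PySem.List.insert out it.1 it.2 else out)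
        (pre ++ ds)
      = pre ++ pvMerge ds ts := by
  intro ts
  induction ts with
  | nil =>
    intro pre ds hlen
    have : ds = [] := List.eq_nil_of_length_eq_zero (by simpa using hlen)
    simp [this, PySem.List.enumerate, pvMerge]
  | cons t ts ih =>
    intro pre ds hlen
    rw [PySem.List.enumerate_cons, List.foldl_cons]
    by_cases hc : pvCaret t
    · -- no insert; ds must be nonempty
      simp only [List.countP_cons, hc, if_pos] at hlen
      cases ds with
      | nil => simp at hlen
      | cons d ds' =>
        have hpre : pre ++ d :: ds' = (pre ++ [d]) ++ ds' := by simp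
        have hlen' : ((pre.length : Int) + 1) = (((pre ++ [d]).length : Nat) : Int) := by
          push_cast; simp
        rw [if_neg (by simp [hc])]
        rw [hpre, hlen', ih (pre ++ [d]) ds' (by simpa using hlen)]
        simp [pvMerge, hc]
    · -- insert t at index pre.length
      have hins : PySem.List.insert (pre ++ ds) ((pre.length : Nat) : Int) t
          = (pre ++ [t]) ++ ds := by
        rw [PySem.List.insert_natCast (pre ++ ds) pre.length t (by simp)]
        simp [List.take_append, List.drop_append]
      have hlen' : ((pre.length : Int) + 1) = (((pre ++ [t]).length : Nat) : Int) := by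
        push_cast; simp
      rw [if_pos (by simp [hc]), hins, hlen', ih (pre ++ [t]) ds (by simpa [List.countP_cons, hc] using hlen)]
      simp [pvMerge, hc]

-- B, when not all terms carry a caret and ddos is long enough, computes pvMerge
lemma pvAlt_eq (ddos : List String) (listtt : List String)
    (hall : listtt.all pvCaret = false) (hlen : listtt.countP pvCaret ≤ ddos.length) :
    retrace_or_not_alt ddos listtt = pvMerge ddos listtt := by
  unfold retrace_or_not_alt
  rw [pvSum_eq]
  have hne : ¬ ((listtt.countP pvCaret : Int) = (listtt.length : Int)) := by
    intro h
    have : listtt.countP pvCaret = listtt.length := by exact_mod_cast h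
    have : ∀ a ∈ listtt, pvCaret a := (List.countP_eq_length).1 this
    simp [List.all_eq_true] at hall
    obtain ⟨x, hx, hxc⟩ := hall
    exact absurd (this x hx) (by simp [hxc])
  rw [if_neg hne]
  rw [PySem.List.slice_to_natCast]
  have htk : (ddos.take (listtt.countP pvCaret)).length = listtt.countP pvCaret := by
    simp [List.length_take]; omega
  have := pvInsertFold_eq listtt [] (ddos.take (listtt.countP pvCaret)) htk
  simpa [pvMerge_take listtt ddos (listtt.countP pvCaret) le_rfl] using this

-- ===== VERDICT (by name: the statement is the Claim_ definition above) =====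
theorem retrace_or_not_spec : Claim_equal_retrace_or_not := by
  intro ddos listtt _ hpre
  unfold Spec_retrace_or_not retrace_or_not
  rw [pvFlagLoop_eq]
  by_cases h : listtt.all pvCaret
  · have hk : listtt.countP pvCaret = listtt.length :=
      (List.countP_eq_length).2 (by simpa [List.all_eq_true] using h)
    simp only [h, if_pos, if_neg (by decide : ¬ (0 : Int) = 1)]
    unfold retrace_or_not_alt
    rw [pvSum_eq, hk]
    simp
  · have hlen : listtt.countP pvCaret ≤ ddos.length := by
      rcases hpre with hp | hp
      · exact absurd hp (by simp [h])
      · exact hp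
    rw [if_neg h, if_pos rfl, pvRetrace_eq, pvAlt_eq ddos listtt (by simpa using h) hlen]
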